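-- pv_equiv track=rewrite | github.com/doever/dreams | project/crm/miggre/migrate_index.py | create_index_statements
-- ===== SOURCE A (Python) =====
-- def create_index_statements(index_list):
--     statements = []
--     current_index = []
--     for item in index_list:
--         # 清除空白列表项
--         if not item:
--             continue
--
--         # 如果开始新的索引创建，则清空当前索引的列表
--         if item[0].startswith('CREATE INDEX'):
--             if current_index:
--                 statements.append(' '.join(current_index))
--                 current_index = []
--
--         # 将当前项添加到当前索引的列表中
--         current_index.extend(item)
--
--     # 不要忘记添加最后一个索引
--     if current_index:
--         statements.append(' '.join(current_index))
--
--     return statements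
-- ===== SOURCE B (Python) =====
-- def create_index_statements(index_list):
--     clean = [item for item in index_list if item]
--     out = []
--     rest = clean
--     while rest:
--         head, tail = rest[0], rest[1:]
--         k = 0
--         while k < len(tail) and not tail[k][0].startswith('CREATE INDEX'):
--             k += 1
--         seg = [head] + tail[:k]
--         out.append(' '.join(w for item in seg for w in item))
--         rest = tail[k:]
--     return out
-- ===== Notes on version B (the rewrite author's own statement) =====
-- stated objective: alternative
-- what changed: B replaces A's accumulate-words-then-flush fold (statements/current_index state with flush-on-boundary and a trailing flush) by a two-pointer span scan: it filters out empty items once, then repeatedly takes a segment = head plus the run of non-'CREATE INDEX' items after it, joining each segment directly; no current-word accumulator or final flush exists.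
import Mathlib
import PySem

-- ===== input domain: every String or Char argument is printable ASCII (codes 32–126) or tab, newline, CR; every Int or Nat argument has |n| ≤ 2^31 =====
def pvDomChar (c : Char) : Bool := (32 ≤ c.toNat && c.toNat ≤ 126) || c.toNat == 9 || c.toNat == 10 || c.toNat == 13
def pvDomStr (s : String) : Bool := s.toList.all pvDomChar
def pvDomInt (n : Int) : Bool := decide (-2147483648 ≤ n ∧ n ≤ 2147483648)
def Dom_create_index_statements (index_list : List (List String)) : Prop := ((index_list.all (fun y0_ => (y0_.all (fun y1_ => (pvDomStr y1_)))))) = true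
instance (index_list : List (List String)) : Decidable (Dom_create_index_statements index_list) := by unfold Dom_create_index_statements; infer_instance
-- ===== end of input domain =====

-- B is an alternative decomposition: filter empties once, then scan segment-by-segment
-- (head + run of non-boundary items), joining each segment directly; same return value as A.

-- ===== PORT A =====
-- one loop step of A: skip empty item; flush current_index at a 'CREATE INDEX' boundary; extend
def cisStep (acc : List String × List String) (item : List String) : List String × List String :=
  match item with
  | [] => acc
  | h :: _ =>
    let acc' :=
      if PySem.Str.startswith h "CREATE INDEX" then
        if acc.2 ≠ [] then (acc.1 ++ [PySem.Str.join " " acc.2], ([] : List String)) else acc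
      else acc
    (acc'.1, acc'.2 ++ item)

def create_index_statements (index_list : List (List String)) : List String :=
  let acc := index_list.foldl cisStep ([], [])
  if acc.2 ≠ [] then acc.1 ++ [PySem.Str.join " " acc.2] else acc.1

-- ===== PORT B =====
-- item starts a new index? (items reaching this test are non-empty)
def cisCut (item : List String) : Bool :=
  match item with
  | [] => false
  | h :: _ => PySem.Str.startswith h "CREATE INDEX"

-- B's outer while loop: take head + run of non-boundary items as one segment, emit its join
def cisLoop (out : List String) : List (List String) → List String
  | [] => out
  | h :: t =>
    let body := t.takeWhile (fun it => !cisCut it)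
    cisLoop (out ++ [PySem.Str.join " " (h :: body).flatten]) (t.drop body.length)
  termination_by l => l.length
  decreasing_by simp

def create_index_statements_alt (index_list : List (List String)) : List String :=
  cisLoop [] (index_list.filter (fun it => !it.isEmpty))

-- ===== PRECONDITION & SPEC =====
def Spec_create_index_statements (index_list : List (List String)) (out : List String) : Prop := out = create_index_statements_alt index_list
instance (index_list : List (List String)) (out : List String) : Decidable (Spec_create_index_statements index_list out) := by unfold Spec_create_index_statements; infer_instance

-- ===== CLAIM (what is proved, stated in full; the proofs are below) =====
def Claim_equal_create_index_statements : Prop := ∀ (index_list : List (List String)), Dom_create_index_statements index_list → Spec_create_index_statements index_list (create_index_statements index_list)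

-- ===== LEMMAS AND PROOFS =====

-- A's step is the identity on empty items, so the fold over the raw list equals the fold over the filtered list
theorem cis_foldl_filter (l : List (List String)) (acc : List String × List String) :
    l.foldl cisStep acc = (l.filter (fun it => !it.isEmpty)).foldl cisStep acc := by
  induction l generalizing acc with
  | nil => rfl
  | cons h t ih =>
    cases h with
    | nil => simpa [cisStep] using ih acc
    | cons x xs => simp [List.filter, ih]

theorem cisLoop_acc_fuel (n : Nat) : ∀ (l : List (List String)), l.length ≤ n →
    ∀ out, cisLoop out l = out ++ cisLoop [] l := by
  induction n with
  | zero =>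
    intro l hl out
    have : l = [] := List.eq_nil_of_length_eq_zero (Nat.le_zero.mp hl)
    subst this; simp [cisLoop]
  | succ n ih =>
    intro l hl out
    cases l with
    | nil => simp [cisLoop]
    | cons h t =>
      rw [cisLoop, cisLoop]
      have hlen : (t.drop (t.takeWhile (fun it => !cisCut it)).length).length ≤ n := by
        simp at hl ⊢; omega
      rw [ih _ hlen, List.nil_append,
        ih _ hlen [PySem.Str.join " " (h :: t.takeWhile (fun it => !cisCut it)).flatten]]
      simp

theorem cisLoop_acc (out : List String) (l : List (List String)) :
    cisLoop out l = out ++ cisLoop [] l :=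
  cisLoop_acc_fuel l.length l (le_refl _) out

-- key invariant: from a non-empty current_index, A flushes cur++(run of non-boundary items)
-- and continues at the next boundary — exactly one cisLoop segment
theorem cis_key_fuel (n : Nat) : ∀ (l : List (List String)), l.length ≤ n → (∀ it ∈ l, it ≠ []) →
    ∀ (stmts cur : List String), cur ≠ [] →
    (let acc := l.foldl cisStep (stmts, cur)
     if acc.2 ≠ [] then acc.1 ++ [PySem.Str.join " " acc.2] else acc.1)
    = stmts ++ [PySem.Str.join " " (cur ++ (l.takeWhile (fun it => !cisCut it)).flatten)]
        ++ cisLoop [] (l.drop (l.takeWhile (fun it => !cisCut it)).length) := by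
  induction n with
  | zero =>
    intro l hl _ stmts cur hcur
    have : l = [] := List.eq_nil_of_length_eq_zero (Nat.le_zero.mp hl)
    subst this; simp [cisLoop, hcur]
  | succ n ih =>
    intro l hl hne stmts cur hcur
    cases l with
    | nil => simp [cisLoop, hcur]
    | cons h t =>
      have hh : h ≠ [] := hne h (by simp)
      have ht : ∀ it ∈ t, it ≠ [] := fun it hit => hne it (by simp [hit])
      have htl : t.length ≤ n := by simp at hl; omega
      obtain ⟨x, xs, rfl⟩ : ∃ x xs, h = x :: xs := by
        cases h with | nil => exact absurd rfl hh | cons x xs => exact ⟨x, xs, rfl⟩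
      by_cases hc : cisCut (x :: xs) = true
      · have hsw : PySem.Str.startswith x "CREATE INDEX" = true := by
          simpa [cisCut] using hc
        have step : cisStep (stmts, cur) (x :: xs)
            = (stmts ++ [PySem.Str.join " " cur], x :: xs) := by
          simp only [cisStep]; rw [hsw]; simp [hcur]
        rw [List.foldl_cons, step,
          ih t htl ht (stmts ++ [PySem.Str.join " " cur]) (x :: xs) (by simp)]
        have htw : List.takeWhile (fun it => !cisCut it) ((x :: xs) :: t) = [] := by
          simp [hc]
        rw [htw]
        simp only [List.flatten_nil, List.append_nil, List.length_nil, List.drop_zero]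
        conv_rhs => rw [cisLoop]; rw [List.nil_append]; rw [cisLoop_acc]
        simp
      · have hsw : PySem.Str.startswith x "CREATE INDEX" = false := by
          simpa [cisCut] using hc
        have step : cisStep (stmts, cur) (x :: xs) = (stmts, cur ++ x :: xs) := by
          simp only [cisStep]; rw [hsw]; simp
        rw [List.foldl_cons, step, ih t htl ht stmts (cur ++ x :: xs) (by simp)]
        have htw : List.takeWhile (fun it => !cisCut it) ((x :: xs) :: t)
            = (x :: xs) :: List.takeWhile (fun it => !cisCut it) t := by
          simp [hc]
        rw [htw]
        simp

-- agreement on the cleaned list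
theorem cis_clean (l : List (List String)) (hne : ∀ it ∈ l, it ≠ []) :
    (let acc := l.foldl cisStep ([], [])
     if acc.2 ≠ [] then acc.1 ++ [PySem.Str.join " " acc.2] else acc.1)
    = cisLoop [] l := by
  cases l with
  | nil => simp [cisLoop]
  | cons h t =>
    have hh : h ≠ [] := hne h (by simp)
    have ht : ∀ it ∈ t, it ≠ [] := fun it hit => hne it (by simp [hit])
    obtain ⟨x, xs, rfl⟩ : ∃ x xs, h = x :: xs := by
      cases h with | nil => exact absurd rfl hh | cons x xs => exact ⟨x, xs, rfl⟩
    have step : cisStep (([] : List String), ([] : List String)) (x :: xs)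
        = ([], x :: xs) := by
      simp [cisStep]
    rw [List.foldl_cons, step]
    rw [cis_key_fuel t.length t (le_refl _) ht [] (x :: xs) (by simp)]
    conv_rhs => rw [cisLoop]; rw [List.nil_append]; rw [cisLoop_acc]
    simp

-- ===== VERDICT (by name: the statement is the Claim_ definition above) =====
theorem create_index_statements_spec : Claim_equal_create_index_statements := by
  intro l _
  unfold Spec_create_index_statements create_index_statements create_index_statements_alt
  rw [cis_foldl_filter]
  exact cis_clean _ (by
    intro it hit
    have := List.of_mem_filter hit
    simpa using this)
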